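-- pv_equiv track=rewrite | github.com/TimDeveloper97/csharp-common-veriserve | document_vertification/python.py | find_word_positions
-- ===== SOURCE A (Python) =====
-- def find_word_positions(origin_text: str, word: str) -> list:
--     """Find position word in origin_text"""
--     positions = []
--     idx = origin_text.find(word)
--     while idx != -1:
--         pos = [idx + i for i in range(len(word))]
--         positions.extend(pos)
--         idx = origin_text.find(word, idx + word.__len__())
--     return positions
-- ===== SOURCE B (Python) =====
-- def find_word_positions(origin_text: str, word: str) -> list:
--     """Find position word in origin_text"""
--     m = len(word)
--     starts = [i for i in range(len(origin_text) - m + 1) if origin_text[i:i+m] == word]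
--     positions, last_end = [], 0
--     for i in starts:
--         if i >= last_end:
--             positions.extend(range(i, i + m))
--             last_end = i + m
--     return positions
-- ===== Notes on version B (the rewrite author's own statement) =====
-- stated objective: alternative
-- what changed: B is a two-stage algorithm: it first enumerates ALL (also overlapping) occurrence start indices by comparing the slice at every position, then makes a second greedy pass that keeps only non-overlapping occurrences via a last_end cursor and flattens them into index ranges, instead of A's single find-driven loop that only ever visits non-overlapping matches.
import Mathlib
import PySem

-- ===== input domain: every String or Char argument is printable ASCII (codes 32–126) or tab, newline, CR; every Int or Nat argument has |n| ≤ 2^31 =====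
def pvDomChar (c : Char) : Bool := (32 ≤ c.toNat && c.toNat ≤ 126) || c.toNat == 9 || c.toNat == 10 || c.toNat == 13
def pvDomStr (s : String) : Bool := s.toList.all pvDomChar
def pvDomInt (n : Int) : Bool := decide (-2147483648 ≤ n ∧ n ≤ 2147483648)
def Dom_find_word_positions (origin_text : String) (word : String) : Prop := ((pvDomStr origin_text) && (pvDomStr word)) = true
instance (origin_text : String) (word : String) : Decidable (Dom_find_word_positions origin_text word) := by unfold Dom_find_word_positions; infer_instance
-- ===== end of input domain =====

-- B replaces A's find-driven loop by a two-stage algorithm (enumerate all slice-match starts, then a greedy non-overlap pass); same exact results; Pre_ excludes the empty word, on which A loops forever.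


-- ===== PORT A =====
-- A's while loop: idx = find(word, start); on a hit, extend positions with [idx+i for i in range(len(word))]
-- and continue from idx + len(word).  The dite guard only ensures totality: when the Python loop would run
-- again the guard holds (see lemmas below); when word = [] the Python loop never terminates (outside Pre_).
def goA (s w : List Char) (acc : List Int) (start : Nat) : List Int :=
  if PySem.Chars.findFrom s w (start : Int) none = -1 then acc
  else
    if _h : start < (PySem.Chars.findFrom s w (start : Int) none).toNat + w.length ∧
           (PySem.Chars.findFrom s w (start : Int) none).toNat + w.length ≤ s.length then
      goA s w
        (acc ++ (PySem.List.pyRange 0 (w.length : Int) 1).map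
          (fun i => PySem.Chars.findFrom s w (start : Int) none + i))
        ((PySem.Chars.findFrom s w (start : Int) none).toNat + w.length)
    else
      acc ++ (PySem.List.pyRange 0 (w.length : Int) 1).map
        (fun i => PySem.Chars.findFrom s w (start : Int) none + i)
termination_by s.length - start
decreasing_by omega

def find_word_positions (origin_text : String) (word : String) : List Int :=
  goA origin_text.toList word.toList [] 0

-- ===== PORT B =====
-- B stage 1: starts = [i for i in range(len(s) - m + 1) if s[i:i+m] == word]  (ALL occurrence starts)
def allStartsB (s w : List Char) : List Int :=
  (PySem.List.pyRange 0 ((s.length : Int) - (w.length : Int) + 1) 1).filter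
    (fun i => PySem.List.slice s (some i) (some (i + (w.length : Int))) == w)

-- B stage 2 loop body: if i >= last_end: positions.extend(range(i, i+m)); last_end = i + m
def stepB (m : Int) (st : List Int × Int) (i : Int) : List Int × Int :=
  if st.2 ≤ i then (st.1 ++ PySem.List.pyRange i (i + m) 1, i + m) else st

def find_word_positions_alt (origin_text : String) (word : String) : List Int :=
  ((allStartsB origin_text.toList word.toList).foldl
    (stepB (word.toList.length : Int)) ([], 0)).1

-- ===== PRECONDITION & SPEC =====
-- Pre_ excludes only word = "": there A's Python loops forever (find('') re-finds at the same index),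
-- so A returns on exactly the inputs Pre_ admits.
def Pre_find_word_positions (origin_text : String) (word : String) : Prop := word ≠ ""
instance (origin_text : String) (word : String) : Decidable (Pre_find_word_positions origin_text word) := by
  unfold Pre_find_word_positions; infer_instance

def pvWitness_find_word_positions : String × String := ("abcababc", "ab")

def Spec_find_word_positions (origin_text : String) (word : String) (out : List Int) : Prop := out = find_word_positions_alt origin_text word
instance (origin_text : String) (word : String) (out : List Int) : Decidable (Spec_find_word_positions origin_text word out) := by unfold Spec_find_word_positions; infer_instance

-- ===== CLAIM (what is proved, stated in full; the proofs are below) =====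
def Claim_equal_find_word_positions : Prop := ∀ (origin_text : String) (word : String), Dom_find_word_positions origin_text word → Pre_find_word_positions origin_text word → Spec_find_word_positions origin_text word (find_word_positions origin_text word)

-- ===== LEMMAS AND PROOFS =====

-- A's match positions [idx+i for i in range(len(word))] are exactly range(idx, idx+len(word)).
lemma pos_lists_eq (idx : Int) (m : Nat) :
    (PySem.List.pyRange 0 (m : Int) 1).map (fun i => idx + i)
      = PySem.List.pyRange idx (idx + (m : Int)) 1 := by
  simp [PySem.List.pyRange_one, List.map_map, Function.comp_def]

-- a prefix at a later index is an infix at an earlier one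
lemma prefix_drop_infix (s w : List Char) (j k : Nat) (hjk : j ≤ k)
    (h : w <+: s.drop k) : w <:+: s.drop j := by
  have hdrop : s.drop k = (s.drop j).drop (k - j) := by
    rw [List.drop_drop]; congr 1; omega
  rw [hdrop] at h
  exact h.isInfix.trans (List.drop_suffix _ _).isInfix

-- membership in B's stage-1 list: exactly the occurrence starts (as natural numbers)
lemma mem_allStartsB (s w : List Char) (i : Int) :
    i ∈ allStartsB s w ↔
      ∃ k : Nat, i = (k : Int) ∧ k + w.length ≤ s.length ∧ w <+: s.drop k := by
  unfold allStartsB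
  rw [List.mem_filter, PySem.List.mem_pyRange_one]
  constructor
  · rintro ⟨⟨h0, hlt⟩, hpred⟩
    refine ⟨i.toNat, (Int.toNat_of_nonneg h0).symm, by omega, ?_⟩
    have hi : i = ((i.toNat : Nat) : Int) := (Int.toNat_of_nonneg h0).symm
    rw [hi, PySem.List.slice_natCast_add] at hpred
    have hlen : i.toNat + w.length ≤ s.length := by omega
    have htake : (s.drop i.toNat).take w.length = w := by
      exact eq_of_beq hpred
    rw [List.prefix_iff_eq_take]
    rw [htake]
  · rintro ⟨k, rfl, hle, hpre⟩
    have htake : (s.drop k).take w.length = w := by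
      have := (List.prefix_iff_eq_take.mp hpre).symm
      simpa using this
    refine ⟨⟨by positivity, by omega⟩, ?_⟩
    rw [PySem.List.slice_natCast_add, htake]
    simp

lemma pairwise_allStartsB (s w : List Char) : (allStartsB s w).Pairwise (· < ·) :=
  (PySem.List.pairwise_lt_pyRange_one _ _).filter _

-- the two actions of B's loop body, as rewrite equations
lemma stepB_skip (m : Int) (acc : List Int) (e i : Int) (h : ¬ e ≤ i) :
    stepB m (acc, e) i = (acc, e) := by
  unfold stepB; rw [if_neg h]

lemma stepB_take (m : Int) (acc : List Int) (e i : Int) (h : e ≤ i) :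
    stepB m (acc, e) i = (acc ++ PySem.List.pyRange i (i + m) 1, i + m) := by
  unfold stepB; rw [if_pos h]

-- elements below the cursor are skipped: filtering them out does not change the fold
lemma foldB_filter_mono (m e₀ : Int) (hm : 0 ≤ m) :
    ∀ (l : List Int) (acc : List Int) (e : Int), e₀ ≤ e →
      (l.filter (fun i => decide (e₀ ≤ i))).foldl (stepB m) (acc, e)
        = l.foldl (stepB m) (acc, e) := by
  intro l
  induction l with
  | nil => intro acc e _; rfl
  | cons i t ih =>
    intro acc e he
    by_cases hi : e₀ ≤ i
    · rw [List.filter_cons_of_pos (by simpa using hi)]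
      simp only [List.foldl_cons]
      by_cases hei : e ≤ i
      · rw [stepB_take m acc e i hei]; exact ih _ _ (by omega)
      · rw [stepB_skip m acc e i hei]; exact ih _ _ he
    · rw [List.filter_cons_of_neg (by simpa using hi)]
      simp only [List.foldl_cons]
      rw [stepB_skip m acc e i (by omega)]
      exact ih _ _ he

-- extracting the least retained element of a sorted list
lemma filter_cons_extract (idx : Int) :
    ∀ (l : List Int), l.Pairwise (· < ·) → idx ∈ l →
      l.filter (fun i => decide (idx ≤ i)) = idx :: l.filter (fun i => decide (idx + 1 ≤ i)) := by
  intro l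
  induction l with
  | nil => intro _ h; cases h
  | cons a t ih =>
    intro hpw hmem
    rcases List.pairwise_cons.mp hpw with ⟨ha, hpt⟩
    rcases List.mem_cons.mp hmem with rfl | hmemt
    · rw [List.filter_cons_of_pos (by simp), List.filter_cons_of_neg (by simp)]
      congr 1
      apply List.filter_congr
      intro x hx
      have := ha x hx
      simp only [decide_eq_decide]
      omega
    · have halt : a < idx := ha idx hmemt
      rw [List.filter_cons_of_neg (by simp; omega), List.filter_cons_of_neg (by simp; omega)]
      exact ih hpt hmemt

-- Main invariant: from any start ≤ len, A's find-loop equals B's greedy pass with cursor start.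
lemma goA_eq_foldB (s w : List Char) (hw : w ≠ []) :
    ∀ start, start ≤ s.length → ∀ acc,
      goA s w acc start
        = ((allStartsB s w).foldl (stepB (w.length : Int)) (acc, (start : Int))).1 := by
  intro start
  induction hn : s.length - start using Nat.strong_induction_on generalizing start with
  | _ n ih =>
  intro hstart acc
  have hwlen : 0 < w.length := List.length_pos_iff.mpr hw
  by_cases hfind : PySem.Chars.findFrom s w (start : Int) none = -1
  · -- no occurrence at or after start: A returns acc; every start in B's list is < start, all skipped
    rw [goA, if_pos hfind]
    have hninf : ¬ w <:+: s.drop start :=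
      (PySem.Chars.findFrom_natCast_eq_neg_one_iff s w start hstart).mp hfind
    have hempty : (allStartsB s w).filter (fun i => decide ((start : Int) ≤ i)) = [] := by
      rw [List.filter_eq_nil_iff]
      intro i hi hdec
      rcases (mem_allStartsB s w i).mp hi with ⟨k, rfl, hle, hpre⟩
      have hsk : start ≤ k := by exact_mod_cast of_decide_eq_true hdec
      exact hninf (prefix_drop_infix s w start k hsk hpre)
    rw [← foldB_filter_mono (w.length : Int) (start : Int) (by positivity) _ acc _ le_rfl, hempty]
    rfl
  · obtain ⟨hle, hpre, hmin⟩ := PySem.Chars.findFrom_natCast_spec s w start hstart hfind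
    set idx := PySem.Chars.findFrom s w (start : Int) none with hidx
    have hidx0 : 0 ≤ idx := le_trans (by exact_mod_cast Nat.zero_le start) hle
    have hidxN : (idx.toNat : Int) = idx := Int.toNat_of_nonneg hidx0
    have hfit : idx.toNat + w.length ≤ s.length := by
      have := hpre.length_le
      simp only [List.length_drop] at this
      omega
    have hlt : start ≤ idx.toNat := by omega
    have hmem : idx ∈ allStartsB s w :=
      (mem_allStartsB s w idx).mpr ⟨idx.toNat, hidxN.symm, hfit, hpre⟩
    -- A takes one find-step
    rw [goA, if_neg hfind, ← hidx, dif_pos ⟨by omega, hfit⟩]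
    -- B: skip below start, the first retained element is idx, consume it, skip below idx + m
    rw [← foldB_filter_mono (w.length : Int) (start : Int) (by positivity) _ acc _ le_rfl]
    have hcongr : (allStartsB s w).filter (fun i => decide ((start : Int) ≤ i))
        = (allStartsB s w).filter (fun i => decide (idx ≤ i)) := by
      apply List.filter_congr
      intro x hx
      rcases (mem_allStartsB s w x).mp hx with ⟨k, rfl, hkle, hkpre⟩
      simp only [decide_eq_decide]
      constructor
      · intro hsx
        by_contra hxk
        exact hmin k (by exact_mod_cast hsx) (by omega) hkpre
      · intro h; omega
    rw [hcongr, filter_cons_extract idx _ (pairwise_allStartsB s w) hmem,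
      List.foldl_cons, stepB_take (w.length : Int) acc (start : Int) idx hle,
      foldB_filter_mono (w.length : Int) (idx + 1) (by positivity) _ _ _ (by omega)]
    have hrec := ih (s.length - (idx.toNat + w.length)) (by omega) (idx.toNat + w.length) rfl hfit
      (acc ++ (PySem.List.pyRange 0 (w.length : Int) 1).map (fun i => idx + i))
    rw [hrec, pos_lists_eq]
    congr 2
    · push_cast [hidxN]
      rfl

-- ===== VERDICT (by name: the statement is the Claim_ definition above) =====
theorem find_word_positions_spec : Claim_equal_find_word_positions := by
  intro origin_text word _ hpre
  unfold Spec_find_word_positions find_word_positions find_word_positions_alt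
  exact goA_eq_foldB origin_text.toList word.toList
    (fun h => hpre (String.toList_inj.mp (by simp [h]))) 0 (Nat.zero_le _) []
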